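-- pv_equiv track=rewrite | github.com/ftx66/arxiv_rss_bot | notion_publisher.py | extract_categories_from_description
-- ===== SOURCE A (Python) =====
-- from typing import List, Dict, Any
--
-- def extract_categories_from_description(description: str) -> List[str]:
--     if not description:
--         return []
--     for line in description.split("\n"):
--         l = line.strip()
--         if l.lower().startswith("categories:"):
--             cats = l.split(":", 1)[1].strip()
--             return [c.strip() for c in cats.split(",") if c.strip()]
--     return []
-- ===== SOURCE B (Python) =====
-- WS = " \t\r\x0b\x0c"
--
--
-- def extract_categories_from_description(description: str):
--     # Single character-level scan over the string: never materializes the list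
--     # of lines; walks line starts by index, skips the line's leading whitespace
--     # in place and compares the 11-character window case-insensitively.
--     n = len(description)
--     i = 0
--     while i < n:
--         while i < n and description[i] in WS:  # leading whitespace of this line
--             i += 1
--         if description[i:i + 11].lower() == "categories:":
--             j = description.find("\n", i)
--             if j == -1:
--                 j = n
--             tail = description[i + 11:j].strip()
--             return [c.strip() for c in tail.split(",") if c.strip()]
--         while i < n and description[i] != "\n":  # rest of this line
--             i += 1
--         i += 1
--     return []
-- ===== Notes on version B (the rewrite author's own statement) =====
-- stated objective: alternative
-- what changed: Replaced A's split-into-lines + per-line strip/startswith loop by a single in-place character-level scan that walks line-start indices of the raw string, skips whitespace by index and compares an 11-character case-insensitive window, never materializing a list of lines.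
import Mathlib
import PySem

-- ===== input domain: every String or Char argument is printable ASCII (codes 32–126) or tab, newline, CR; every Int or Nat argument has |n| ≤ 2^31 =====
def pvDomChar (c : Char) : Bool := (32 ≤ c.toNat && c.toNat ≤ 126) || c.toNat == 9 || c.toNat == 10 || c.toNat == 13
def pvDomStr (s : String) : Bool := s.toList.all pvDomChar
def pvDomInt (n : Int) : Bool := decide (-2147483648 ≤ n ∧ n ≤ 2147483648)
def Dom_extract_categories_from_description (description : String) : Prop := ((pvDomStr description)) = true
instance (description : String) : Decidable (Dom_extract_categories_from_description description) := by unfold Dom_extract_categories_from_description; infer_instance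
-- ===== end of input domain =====

-- B replaces A's split-into-lines + per-line strip/startswith loop by a single in-place
-- character-level scan over the raw string (indices + an 11-char case-insensitive window),
-- never materializing the list of lines; objective: alternative, same asymptotic cost.


-- ===== PORT A =====
-- the for-loop over description.split("\n") with early return (strings as char lists)
def pvLoopA : List (List Char) → List String
  | [] => []
  | line :: rest =>
      let l := PySem.Chars.strip line
      if PySem.Chars.startswith (PySem.Chars.lower l) ("categories:".toList) then
        -- l.split(":", 1)[1]: index 1 always exists here (l contains ":"), so the default is unused
        let cats := PySem.Chars.strip (PySem.List.pyGetD (PySem.Chars.splitOnMax l [':'] 1) 1 [])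
        (((PySem.Chars.splitOn cats [',']).map PySem.Chars.strip).filter
          (fun c => !c.isEmpty)).map String.ofList
      else pvLoopA rest

def extract_categories_from_description (description : String) : List String :=
  if description = "" then []
  else pvLoopA (PySem.Chars.splitOn description.toList ['\n'])

-- ===== PORT B =====
-- WS = " \t\r\x0b\x0c"
def pvWS : List Char := [' ', '\t', '\r', '\x0b', '\x0c']

-- while i < n and description[i] in WS: i += 1   (the fuel only makes the while structural)
def pvSkipWS (s : List Char) : Nat → Nat → Nat
  | 0, i => i
  | fuel+1, i =>
      if decide (i < s.length) && pvWS.contains (s.getD i ':') then pvSkipWS s fuel (i+1) else i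

-- while i < n and description[i] != "\n": i += 1
def pvSkipLine (s : List Char) : Nat → Nat → Nat
  | 0, i => i
  | fuel+1, i =>
      if decide (i < s.length) && !(s.getD i '\n' == '\n') then pvSkipLine s fuel (i+1) else i

-- the outer while i < n loop; i strictly increases each round, so fuel n+1 suffices
def pvLoopB (s : List Char) : Nat → Nat → List String
  | 0, _ => []
  | fuel+1, i =>
      if i < s.length then
        let i1 := pvSkipWS s (s.length - i) i
        if PySem.Chars.lower (PySem.List.slice s (some (i1 : Int)) (some ((i1 : Int) + 11)))
            = "categories:".toList then
          let j := PySem.Chars.findFrom s ['\n'] (i1 : Int)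
          let j1 : Int := if j = -1 then (s.length : Int) else j
          let tail := PySem.Chars.strip (PySem.List.slice s (some ((i1 : Int) + 11)) (some j1))
          (((PySem.Chars.splitOn tail [',']).map PySem.Chars.strip).filter
            (fun c => !c.isEmpty)).map String.ofList
        else
          let i2 := pvSkipLine s (s.length - i1) i1
          pvLoopB s fuel (i2 + 1)
      else []

def extract_categories_from_description_alt (description : String) : List String :=
  pvLoopB description.toList (description.toList.length + 1) 0

-- ===== PRECONDITION & SPEC =====
def Spec_extract_categories_from_description (description : String) (out : List String) : Prop :=
  out = extract_categories_from_description_alt description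
instance (description : String) (out : List String) :
    Decidable (Spec_extract_categories_from_description description out) := by
  unfold Spec_extract_categories_from_description; infer_instance

-- ===== CLAIM =====
def Claim_equal_extract_categories_from_description : Prop :=
  ∀ (description : String), Dom_extract_categories_from_description description →
    Spec_extract_categories_from_description description
      (extract_categories_from_description description)

-- ===== LEMMAS AND PROOFS =====

theorem pv_beq_toNat (c d : Char) : (c == d) = decide (c.toNat = d.toNat) := by
  by_cases h : c.toNat = d.toNat
  · obtain rfl := Char.ext (UInt32.toNat_inj.mp h); simp
  · have hne : c ≠ d := fun he => h (by rw [he])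
    simp [hne, h]

theorem pv_ws_eq_isspace (c : Char) (hd : pvDomChar c = true) (hn : c ≠ '\n') :
    pvWS.contains c = PySem.Chars.isspace c := by
  have hn' : c.toNat ≠ 10 := fun h => hn (Char.ext (UInt32.toNat_inj.mp h))
  simp only [pvDomChar, Bool.or_eq_true, Bool.and_eq_true, decide_eq_true_eq,
    beq_iff_eq] at hd
  simp only [pvWS, List.contains_cons, List.contains_nil, pv_beq_toNat,
    PySem.Chars.isspace]
  simp only [show (' ').toNat = 32 from rfl, show ('\t').toNat = 9 from rfl,
    show ('\r').toNat = 13 from rfl, show ('\x0b').toNat = 11 from rfl,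
    show ('\x0c').toNat = 12 from rfl]
  apply Bool.eq_iff_iff.mpr
  simp only [Bool.or_eq_true, Bool.and_eq_true, decide_eq_true_eq]
  simp only [Bool.false_eq_true, or_false]
  omega

theorem pv_dropWhile_congr {α : Type} (p q : α → Bool) (l : List α)
    (h : ∀ x ∈ l, p x = q x) : l.dropWhile p = l.dropWhile q := by
  induction l with
  | nil => rfl
  | cons x t ih =>
      have hx := h x (by simp)
      simp only [List.dropWhile_cons, hx]
      cases q x with
      | false => rfl
      | true => exact ih (fun y hy => h y (by simp [hy]))

theorem pv_go_acc (sep : List Char) (fuel : Nat) :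
    ∀ (l cur : List Char) (acc : List (List Char)),
    PySem.Chars.splitOn.go sep fuel l cur acc
      = acc.reverse ++ PySem.Chars.splitOn.go sep fuel l cur [] := by
  induction fuel with
  | zero => intro l cur acc; simp [PySem.Chars.splitOn.go]
  | succ f ih =>
      intro l cur acc
      cases l with
      | nil => simp [PySem.Chars.splitOn.go]
      | cons c rest =>
          simp only [PySem.Chars.splitOn.go]
          by_cases hp : sep.isPrefixOf (c :: rest) = true
          · rw [if_pos hp, if_pos hp, ih _ _ (cur.reverse :: acc), ih _ _ [cur.reverse]]
            simp
          · rw [if_neg hp, if_neg hp, ih _ _ acc]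

theorem pv_go_nosep (c : Char) (u : List Char) :
    ∀ (fuel : Nat) (cur : List Char) (acc : List (List Char)), c ∉ u → u.length < fuel →
    PySem.Chars.splitOn.go [c] fuel u cur acc = ((cur.reverse ++ u) :: acc).reverse := by
  induction u with
  | nil =>
      intro fuel cur acc _ hf
      cases fuel with
      | zero => omega
      | succ f => simp [PySem.Chars.splitOn.go]
  | cons d rest ih =>
      intro fuel cur acc hmem hf
      cases fuel with
      | zero => simp at hf
      | succ f =>
          have hd : c ≠ d := fun h => hmem (by simp [h])
          have hp : ¬ ([c].isPrefixOf (d :: rest) = true) := by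
            simp [List.isPrefixOf]; exact hd
          simp only [PySem.Chars.splitOn.go]
          rw [if_neg hp, ih f (d :: cur) acc (fun h => hmem (by simp [h])) (by simp at hf; omega)]
          simp

theorem pv_go_enter (c : Char) (b : List Char) :
    ∀ (a : List Char) (fuel : Nat) (cur : List Char) (acc : List (List Char)), c ∉ a →
    a.length < fuel →
    PySem.Chars.splitOn.go [c] fuel (a ++ c :: b) cur acc
      = PySem.Chars.splitOn.go [c] (fuel - (a.length + 1)) b [] ((cur.reverse ++ a) :: acc) := by
  intro a
  induction a with
  | nil =>
      intro fuel cur acc _ hf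
      cases fuel with
      | zero => omega
      | succ f =>
          have hp : [c].isPrefixOf (c :: b) = true := by simp [List.isPrefixOf]
          simp only [List.nil_append, PySem.Chars.splitOn.go]
          rw [if_pos hp]
          simp
  | cons d a' ih =>
      intro fuel cur acc hmem hf
      cases fuel with
      | zero => simp at hf
      | succ f =>
          have hd : c ≠ d := fun h => hmem (by simp [h])
          have hp : ¬ ([c].isPrefixOf (d :: (a' ++ c :: b)) = true) := by
            simp [List.isPrefixOf]; exact hd
          simp only [List.cons_append, PySem.Chars.splitOn.go]
          rw [if_neg hp, ih f (d :: cur) acc (fun h => hmem (by simp [h])) (by simp at hf; omega)]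
          simp only [List.length_cons, List.reverse_cons, List.append_assoc, List.cons_append,
            List.nil_append]
          have harr : f + 1 - (a'.length + 1 + 1) = f - (a'.length + 1) := by omega
          rw [harr]

theorem pv_splitOn_no_sep (c : Char) (u : List Char) (h : c ∉ u) :
    PySem.Chars.splitOn u [c] = [u] := by
  unfold PySem.Chars.splitOn
  rw [pv_go_nosep c u (u.length + 1) [] [] h (by omega)]
  simp

theorem pv_splitOn_cons (c : Char) (a b : List Char) (h : c ∉ a) :
    PySem.Chars.splitOn (a ++ c :: b) [c] = a :: PySem.Chars.splitOn b [c] := by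
  unfold PySem.Chars.splitOn
  rw [pv_go_enter c b a ((a ++ c :: b).length + 1) [] [] h (by simp)]
  have harith : (a ++ c :: b).length + 1 - (a.length + 1) = b.length + 1 := by simp
  rw [harith, pv_go_acc]
  simp

theorem pv_skipWS_eq (s : List Char) :
    ∀ (fuel i : Nat), ((s.drop i).takeWhile (pvWS.contains ·)).length ≤ fuel →
    pvSkipWS s fuel i = i + ((s.drop i).takeWhile (pvWS.contains ·)).length := by
  intro fuel
  induction fuel with
  | zero =>
      intro i hf
      simp only [Nat.le_zero, List.length_eq_zero_iff] at hf
      rw [hf]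
      simp only [List.length_nil, Nat.add_zero]
      rfl
  | succ f ih =>
      intro i hf
      have hunf : pvSkipWS s (f + 1) i
          = if decide (i < s.length) && pvWS.contains (s.getD i ':') then pvSkipWS s f (i + 1)
            else i := rfl
      by_cases hi : i < s.length
      · have hdrop : s.drop i = s[i] :: s.drop (i + 1) := List.drop_eq_getElem_cons hi
        have hget : s.getD i ':' = s[i] := List.getD_eq_getElem s ':' hi
        by_cases hws : pvWS.contains s[i] = true
        · have htw : (s.drop i).takeWhile (pvWS.contains ·)
              = s[i] :: (s.drop (i + 1)).takeWhile (pvWS.contains ·) := by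
            rw [hdrop, List.takeWhile_cons, if_pos hws]
          rw [htw] at hf ⊢
          simp only [List.length_cons] at hf ⊢
          rw [hunf, hget, if_pos (by rw [hws, decide_eq_true hi]; rfl)]
          rw [ih (i + 1) (by omega)]
          omega
        · have htw : (s.drop i).takeWhile (pvWS.contains ·) = [] := by
            rw [hdrop, List.takeWhile_cons, if_neg hws]
          rw [htw, hunf, hget]
          rw [if_neg (by simp only [Bool.and_eq_true, not_and]; intro _; exact hws)]
          rfl
      · have hdrop : s.drop i = [] := List.drop_eq_nil_of_le (by omega)
        rw [hdrop, hunf]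
        rw [if_neg (by simp [hi])]
        rfl

theorem pv_skipLine_eq (s : List Char) :
    ∀ (fuel i : Nat), ((s.drop i).takeWhile (fun c => !(c == '\n'))).length ≤ fuel →
    pvSkipLine s fuel i = i + ((s.drop i).takeWhile (fun c => !(c == '\n'))).length := by
  intro fuel
  induction fuel with
  | zero =>
      intro i hf
      simp only [Nat.le_zero, List.length_eq_zero_iff] at hf
      rw [hf]
      simp only [List.length_nil, Nat.add_zero]
      rfl
  | succ f ih =>
      intro i hf
      have hunf : pvSkipLine s (f + 1) i
          = if decide (i < s.length) && !(s.getD i '\n' == '\n') then pvSkipLine s f (i + 1)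
            else i := rfl
      by_cases hi : i < s.length
      · have hdrop : s.drop i = s[i] :: s.drop (i + 1) := List.drop_eq_getElem_cons hi
        have hget : s.getD i '\n' = s[i] := List.getD_eq_getElem s '\n' hi
        by_cases hws : (!(s[i] == '\n')) = true
        · have htw : (s.drop i).takeWhile (fun c => !(c == '\n'))
              = s[i] :: (s.drop (i + 1)).takeWhile (fun c => !(c == '\n')) := by
            rw [hdrop, List.takeWhile_cons, if_pos hws]
          rw [htw] at hf ⊢
          simp only [List.length_cons] at hf ⊢
          rw [hunf, hget, if_pos (by rw [hws, decide_eq_true hi]; rfl)]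
          rw [ih (i + 1) (by omega)]
          omega
        · have htw : (s.drop i).takeWhile (fun c => !(c == '\n')) = [] := by
            rw [hdrop, List.takeWhile_cons, if_neg hws]
          rw [htw, hunf, hget]
          rw [if_neg (by simp only [hws, Bool.and_false]; exact Bool.false_ne_true)]
          rfl
      · have hdrop : s.drop i = [] := List.drop_eq_nil_of_le (by omega)
        rw [hdrop, hunf]
        rw [if_neg (by simp [hi])]
        rfl

theorem pv_find_go_nl (r : List Char) :
    ∀ (core : List Char) (k : Nat), '\n' ∉ core →
    PySem.Chars.find.go ['\n'] (core ++ '\n' :: r) k = (k : Int) + core.length := by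
  intro core
  induction core with
  | nil =>
      intro k _
      have hp : ['\n'].isPrefixOf ('\n' :: r) = true := by simp [List.isPrefixOf]
      simp [PySem.Chars.find.go, hp]
  | cons d t ih =>
      intro k hmem
      have hd : d ≠ '\n' := fun h => hmem (by simp [h])
      have hp : ¬ (['\n'].isPrefixOf (d :: (t ++ '\n' :: r)) = true) := by
        simp [List.isPrefixOf]; exact fun h => hd h.symm
      simp only [List.cons_append, PySem.Chars.find.go]
      rw [if_neg hp, ih (k + 1) (fun h => hmem (by simp [h]))]
      simp only [List.length_cons]
      push_cast
      ring

theorem pv_find_nl (core r : List Char) (h : '\n' ∉ core) :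
    PySem.Chars.find (core ++ '\n' :: r) ['\n'] = core.length := by
  unfold PySem.Chars.find
  rw [pv_find_go_nl r core 0 h]
  simp

theorem pv_rstrip_prefix (x : List Char) : PySem.Chars.rstrip x <+: x := by
  unfold PySem.Chars.rstrip
  rw [← List.reverse_suffix, List.reverse_reverse]
  exact List.dropWhile_suffix _

theorem pv_rstrip_append_nonws (a b : List Char)
    (h : b.reverse.dropWhile PySem.Chars.isspace ≠ []) :
    PySem.Chars.rstrip (a ++ b) = a ++ PySem.Chars.rstrip b := by
  unfold PySem.Chars.rstrip
  rw [List.reverse_append, List.dropWhile_append,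
    if_neg (by simpa [List.isEmpty_iff] using h)]
  simp

theorem pv_rstrip_append_ws (a b : List Char) (h : ∀ d ∈ b, PySem.Chars.isspace d = true) :
    PySem.Chars.rstrip (a ++ b) = PySem.Chars.rstrip a := by
  unfold PySem.Chars.rstrip
  rw [List.reverse_append, List.dropWhile_append,
    if_pos (by simp [List.isEmpty_iff, List.dropWhile_eq_nil_iff]; intro x hx; exact h x hx)]

theorem pv_rstrip_last_nonws (a : List Char) (d : Char) (h : PySem.Chars.isspace d = false) :
    PySem.Chars.rstrip (a ++ [d]) = a ++ [d] := by
  rw [pv_rstrip_append_nonws a [d] (by simp [List.dropWhile, h])]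
  unfold PySem.Chars.rstrip
  simp [List.dropWhile, h]

theorem pv_strip_all_ws (x : List Char) (h : ∀ d ∈ x, PySem.Chars.isspace d = true) :
    PySem.Chars.strip x = [] := by
  unfold PySem.Chars.strip PySem.Chars.lstrip
  rw [List.dropWhile_eq_nil_iff.mpr h]
  rfl

theorem pv_rstrip_eq_nil_iff (x : List Char) :
    PySem.Chars.rstrip x = [] ↔ ∀ d ∈ x, PySem.Chars.isspace d = true := by
  unfold PySem.Chars.rstrip
  rw [List.reverse_eq_nil_iff, List.dropWhile_eq_nil_iff]
  constructor
  · intro h d hd; exact h d (by simpa using hd)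
  · intro h d hd; exact h d (by simpa using hd)

theorem pv_dropWhile_head {α : Type} (p : α → Bool) (l : List α) (e : α) (t : List α)
    (h : l.dropWhile p = e :: t) : p e = false := by
  induction l with
  | nil => simp at h
  | cons x xs ih =>
      rw [List.dropWhile_cons] at h
      by_cases hx : p x = true
      · rw [if_pos hx] at h; exact ih h
      · rw [if_neg hx] at h
        cases h
        simpa using hx

theorem pv_strip_rstrip (z : List Char) :
    PySem.Chars.strip (PySem.Chars.rstrip z) = PySem.Chars.strip z := by
  cases hz2 : z.dropWhile PySem.Chars.isspace with
  | nil =>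
      have hall : ∀ d ∈ z, PySem.Chars.isspace d = true := List.dropWhile_eq_nil_iff.mp hz2
      have hr : PySem.Chars.rstrip z = [] := (pv_rstrip_eq_nil_iff z).mpr hall
      rw [hr, pv_strip_all_ws z hall]
      rfl
  | cons e z3 =>
      have he : PySem.Chars.isspace e = false := pv_dropWhile_head _ z e z3 hz2
      have hzsplit : z = z.takeWhile PySem.Chars.isspace ++ (e :: z3) := by
        rw [← hz2, List.takeWhile_append_dropWhile]
      have hwall : ∀ d ∈ z.takeWhile PySem.Chars.isspace, PySem.Chars.isspace d = true :=
        fun d hd => List.mem_takeWhile_imp hd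
      have hz2ne : (e :: z3).reverse.dropWhile PySem.Chars.isspace ≠ [] := by
        intro hnil
        have := List.dropWhile_eq_nil_iff.mp hnil e (by simp)
        rw [he] at this
        exact Bool.false_ne_true this
      have hrz : PySem.Chars.rstrip z
          = z.takeWhile PySem.Chars.isspace ++ PySem.Chars.rstrip (e :: z3) := by
        conv_lhs => rw [hzsplit]
        exact pv_rstrip_append_nonws _ _ hz2ne
      -- rstrip (e :: z3) is nonempty and starts with e
      have hrne : PySem.Chars.rstrip (e :: z3) ≠ [] := by
        intro hnil
        have := (pv_rstrip_eq_nil_iff _).mp hnil e (by simp)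
        rw [he] at this
        exact Bool.false_ne_true this
      obtain ⟨f, ft, hf⟩ : ∃ f ft, PySem.Chars.rstrip (e :: z3) = f :: ft := by
        cases hmm : PySem.Chars.rstrip (e :: z3) with
        | nil => exact absurd hmm hrne
        | cons f ft => exact ⟨f, ft, rfl⟩
      have hfe : f = e := by
        have hpre := pv_rstrip_prefix (e :: z3)
        rw [hf] at hpre
        obtain ⟨t, ht⟩ := hpre
        cases ht
        rfl
      -- lstrip of both sides
      have hlhs : PySem.Chars.lstrip (PySem.Chars.rstrip z) = PySem.Chars.rstrip (e :: z3) := by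
        rw [hrz]
        unfold PySem.Chars.lstrip
        rw [List.dropWhile_append, if_pos (by
          simp only [List.isEmpty_iff]
          exact List.dropWhile_eq_nil_iff.mpr hwall)]
        rw [hf, hfe, List.dropWhile_cons, if_neg (by rw [he]; exact Bool.false_ne_true)]
      have hrhs : PySem.Chars.lstrip z = e :: z3 := hz2
      unfold PySem.Chars.strip
      rw [hlhs, hrhs]
      -- rstrip is idempotent on rstrip (e :: z3)
      unfold PySem.Chars.rstrip
      rw [List.reverse_reverse]
      congr 1
      generalize (e :: z3).reverse = w
      induction w with
      | nil => rfl
      | cons x xs ih =>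
          rw [List.dropWhile_cons]
          by_cases hx : PySem.Chars.isspace x = true
          · rw [if_pos hx]; exact ih
          · rw [if_neg hx, List.dropWhile_cons, if_neg hx]

theorem pv_lowerChar_colon (c : Char) (h : PySem.Chars.lowerChar c = ':') : c = ':' := by
  unfold PySem.Chars.lowerChar at h
  split at h
  · rename_i hu
    unfold PySem.Chars.isupper at hu
    simp only [Bool.and_eq_true, decide_eq_true_eq, Char.le_def] at hu
    have h65 : 65 ≤ c.toNat := hu.1
    have h90 : c.toNat ≤ 90 := hu.2
    have hv : (Char.ofNat (c.toNat + 32)).toNat = c.toNat + 32 := by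
      rw [Char.toNat_ofNat, if_pos]
      exact Or.inl (by omega)
    have h58 : (Char.ofNat (c.toNat + 32)).toNat = 58 := by rw [h]; rfl
    omega
  · exact h

theorem pv_go_zero (sep : List Char) (fuel : Nat) (l cur : List Char) (acc : List (List Char)) :
    PySem.Chars.splitOnMax.go sep fuel 0 l cur acc = ((cur.reverse ++ l) :: acc).reverse := by
  cases fuel with
  | zero => simp [PySem.Chars.splitOnMax.go]
  | succ f => cases l <;> simp [PySem.Chars.splitOnMax.go]

theorem pv_go_one (b : List Char) : ∀ (a : List Char) (fuel : Nat) (cur : List Char)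
    (acc : List (List Char)), ':' ∉ a → a.length < fuel →
    PySem.Chars.splitOnMax.go [':'] fuel 1 (a ++ ':' :: b) cur acc
      = (b :: (cur.reverse ++ a) :: acc).reverse := by
  intro a
  induction a with
  | nil =>
      intro fuel cur acc _ hfuel
      cases fuel with
      | zero => omega
      | succ f =>
          simp only [List.nil_append]
          rw [show PySem.Chars.splitOnMax.go [':'] (f + 1) 1 (':' :: b) cur acc
              = PySem.Chars.splitOnMax.go [':'] f 0 (List.drop 1 (':' :: b)) [] (cur.reverse :: acc) by
            simp [PySem.Chars.splitOnMax.go, List.isPrefixOf]]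
          rw [pv_go_zero]
          simp
  | cons c a' ih =>
      intro fuel cur acc hmem hfuel
      cases fuel with
      | zero => simp at hfuel
      | succ f =>
          have hc : c ≠ ':' := fun h => hmem (by simp [h])
          rw [show PySem.Chars.splitOnMax.go [':'] (f + 1) 1 ((c :: a') ++ ':' :: b) cur acc
              = PySem.Chars.splitOnMax.go [':'] f 1 (a' ++ ':' :: b) (c :: cur) acc by
            simp [PySem.Chars.splitOnMax.go, List.isPrefixOf, (Ne.symm hc)]]
          rw [ih f (c :: cur) acc (fun h => hmem (by simp [h])) (by simp at hfuel; omega)]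
          simp

theorem pv_splitOnMax_colon (a b : List Char) (ha : ':' ∉ a) :
    PySem.Chars.splitOnMax (a ++ ':' :: b) [':'] 1 = [a, b] := by
  unfold PySem.Chars.splitOnMax
  rw [if_neg (by omega)]
  rw [show Int.toNat 1 = 1 from rfl]
  rw [pv_go_one b a ((a ++ ':' :: b).length + 1) [] [] ha (by simp)]
  simp

theorem pv_decompose (l : List Char)
    (h : PySem.Chars.startswith (PySem.Chars.lower l) ("categories:".toList) = true) :
    l = l.take 10 ++ ':' :: l.drop 11 ∧ (l.take 10).length = 10 ∧ ':' ∉ l.take 10 := by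
  unfold PySem.Chars.startswith PySem.Chars.lower at h
  rw [List.isPrefixOf_iff_prefix] at h
  obtain ⟨t, ht⟩ := h
  have hlen : 11 ≤ l.length := by
    have := congrArg List.length ht
    simp at this
    omega
  have htake : List.map PySem.Chars.lowerChar (l.take 11) = "categories:".toList := by
    rw [List.map_take, ← ht]
    rw [List.take_append_of_le_length (by decide)]
    decide
  have hcolon10 : l[10]? = some ':' := by
    have h1 := congrArg (fun xs => xs[10]?) htake
    simp only [List.getElem?_map] at h1
    have h2 : (l.take 11)[10]? = l[10]? := by
      rw [List.getElem?_take_of_lt (by omega)]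
    rw [h2] at h1
    have h3 : ("categories:".toList)[10]? = some ':' := by decide
    rw [h3] at h1
    cases h4 : l[10]? with
    | none => rw [h4] at h1; simp at h1
    | some c =>
        rw [h4] at h1
        simp only [Option.map_some] at h1
        have := pv_lowerChar_colon c (by injection h1)
        rw [this]
  have h10lt : 10 < l.length := by omega
  have hc : l[10]'h10lt = ':' := by
    have := List.getElem?_eq_some_iff.mp hcolon10
    obtain ⟨hh, hv⟩ := this
    exact hv
  refine ⟨?_, by simp [List.length_take]; omega, ?_⟩
  · conv_lhs => rw [← List.take_append_drop 10 l]
    rw [List.drop_eq_getElem_cons h10lt, hc]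
  · intro hmem
    have h5 : PySem.Chars.lowerChar ':' ∈ List.map PySem.Chars.lowerChar (l.take 10) :=
      List.mem_map_of_mem hmem
    have h6 : List.map PySem.Chars.lowerChar (l.take 10) = ("categories".toList) := by
      have h7 : l.take 10 = (l.take 11).take 10 := by
        rw [List.take_take]
        norm_num
      rw [h7, List.map_take, htake]
      decide
    rw [h6] at h5
    revert h5
    decide

theorem pv_catsA (l : List Char)
    (h : PySem.Chars.startswith (PySem.Chars.lower l) ("categories:".toList) = true) :
    PySem.Chars.strip (PySem.List.pyGetD (PySem.Chars.splitOnMax l [':'] 1) 1 [])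
      = PySem.Chars.strip (l.drop 11) := by
  obtain ⟨hdec, hlen, hmem⟩ := pv_decompose l h
  have hsplit : PySem.Chars.splitOnMax l [':'] 1 = [l.take 10, l.drop 11] := by
    conv_lhs => rw [hdec]
    exact pv_splitOnMax_colon _ _ hmem
  rw [hsplit]
  have hg : PySem.List.pyGetD [l.take 10, l.drop 11] (1 : Int) ([] : List Char)
      = l.drop 11 := by
    unfold PySem.List.pyGetD
    rw [show (1 : Int) = ((1 : Nat) : Int) by rfl, PySem.List.pyGet?_natCast]
    rfl
  rw [hg]

theorem pv_window_len (core r : List Char)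
    (hr : r = [] ∨ ∃ r', r = '\n' :: r')
    (hc : PySem.Chars.lower ((core ++ r).take 11) = "categories:".toList) :
    11 ≤ core.length ∧ PySem.Chars.lower (core.take 11) = "categories:".toList := by
  have h11 : 11 ≤ core.length := by
    by_contra hlt
    push_neg at hlt
    rcases hr with rfl | ⟨r', rfl⟩
    · have := congrArg List.length hc
      simp [PySem.Chars.lower] at this
      omega
    · have hmemnl : '\n' ∈ (core ++ '\n' :: r').take 11 := by
        rw [List.take_append]
        have hpos : 11 - core.length = (11 - core.length - 1) + 1 := by omega
        rw [hpos, List.take_succ_cons]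
        simp
      have := List.mem_map_of_mem (f := PySem.Chars.lowerChar) hmemnl
      rw [show List.map PySem.Chars.lowerChar ((core ++ '\n' :: r').take 11)
          = PySem.Chars.lower ((core ++ '\n' :: r').take 11) from rfl, hc] at this
      have hlc : PySem.Chars.lowerChar '\n' = '\n' := by decide
      rw [hlc] at this
      revert this
      decide
  refine ⟨h11, ?_⟩
  rw [List.take_append_of_le_length h11] at hc
  exact hc

theorem pv_colon10 (core : List Char) (h11 : 11 ≤ core.length)
    (hpat : PySem.Chars.lower (core.take 11) = "categories:".toList) :
    core.take 11 = core.take 10 ++ [':'] := by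
  have h10 : 10 < core.length := by omega
  have hget : core[10]? = some ':' := by
    have h1 := congrArg (fun xs => xs[10]?) hpat
    simp only [PySem.Chars.lower, List.getElem?_map] at h1
    have h2 : (core.take 11)[10]? = core[10]? := List.getElem?_take_of_lt (by omega)
    rw [h2] at h1
    have h3 : ("categories:".toList)[10]? = some ':' := by decide
    rw [h3] at h1
    cases h4 : core[10]? with
    | none => rw [h4] at h1; simp at h1
    | some c =>
        rw [h4] at h1
        simp only [Option.map_some] at h1
        have := pv_lowerChar_colon c (by injection h1)
        rw [this]
  rw [show (11 : Nat) = 10 + 1 from rfl, List.take_succ, hget]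
  rfl

theorem pv_rstrip_core (core : List Char) (h11 : 11 ≤ core.length)
    (hcol : core.take 11 = core.take 10 ++ [':']) :
    (PySem.Chars.rstrip core = core.take 11
        ∧ ∀ d ∈ core.drop 11, PySem.Chars.isspace d = true)
  ∨ (PySem.Chars.rstrip core = core.take 11 ++ PySem.Chars.rstrip (core.drop 11)
        ∧ (core.drop 11).reverse.dropWhile PySem.Chars.isspace ≠ []) := by
  have hsplit : core = core.take 11 ++ core.drop 11 := (List.take_append_drop 11 core).symm
  by_cases hz : (core.drop 11).reverse.dropWhile PySem.Chars.isspace = []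
  · left
    have hall : ∀ d ∈ core.drop 11, PySem.Chars.isspace d = true := by
      intro d hd
      exact List.dropWhile_eq_nil_iff.mp hz d (by simpa using hd)
    constructor
    · conv_lhs => rw [hsplit]
      rw [pv_rstrip_append_ws _ _ hall, hcol,
        pv_rstrip_last_nonws _ _ (by decide)]
    · exact hall
  · right
    constructor
    · conv_lhs => rw [hsplit]
      exact pv_rstrip_append_nonws _ _ hz
    · exact hz

theorem pv_tail (core : List Char)
    (h11 : 11 ≤ core.length)
    (hpat : PySem.Chars.lower (core.take 11) = "categories:".toList) :
    PySem.Chars.strip ((PySem.Chars.rstrip core).drop 11)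
      = PySem.Chars.strip (core.drop 11) := by
  have hcol := pv_colon10 core h11 hpat
  have hlen11 : (core.take 11).length = 11 := by simp; omega
  rcases pv_rstrip_core core h11 hcol with ⟨hr, hall⟩ | ⟨hr, _⟩
  · rw [hr, List.drop_eq_nil_of_le (by omega), pv_strip_all_ws _ hall]
    rfl
  · rw [hr, List.drop_append, List.drop_eq_nil_of_le (by omega), hlen11]
    simpa using pv_strip_rstrip (core.drop 11)

theorem pv_lower_take (x : List Char) (n : Nat) :
    PySem.Chars.lower (x.take n) = (PySem.Chars.lower x).take n := by
  unfold PySem.Chars.lower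
  exact List.map_take ..

theorem pv_cond (core r : List Char)
    (hr : r = [] ∨ ∃ r', r = '\n' :: r') :
    (PySem.Chars.startswith (PySem.Chars.lower (PySem.Chars.rstrip core))
        ("categories:".toList) = true)
      ↔ PySem.Chars.lower ((core ++ r).take 11) = "categories:".toList := by
  constructor
  · intro hA
    rw [PySem.Chars.startswith_iff] at hA
    have hpre1 : PySem.Chars.rstrip core <+: core := pv_rstrip_prefix core
    have hpre2 : PySem.Chars.lower (PySem.Chars.rstrip core) <+: PySem.Chars.lower core :=
      hpre1.map _
    have hA2 : ("categories:".toList) <+: PySem.Chars.lower core := hA.trans hpre2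
    have h11 : 11 ≤ core.length := by
      have := hA2.length_le
      simp [PySem.Chars.lower] at this
      exact this
    have htake := List.prefix_iff_eq_take.mp hA2
    rw [List.take_append_of_le_length h11]
    rw [show ("categories:".toList).length = 11 from rfl] at htake
    rw [pv_lower_take]
    exact htake.symm
  · intro hc
    obtain ⟨h11, hpat⟩ := pv_window_len core r hr hc
    have hcol := pv_colon10 core h11 hpat
    have hlen11 : (core.take 11).length = 11 := by simp; omega
    have hkey : 11 ≤ (PySem.Chars.rstrip core).length
        ∧ (PySem.Chars.rstrip core).take 11 = core.take 11 := by
      rcases pv_rstrip_core core h11 hcol with ⟨hr2, _⟩ | ⟨hr2, _⟩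
      · rw [hr2]
        exact ⟨by omega, List.take_of_length_le (by omega)⟩
      · rw [hr2]
        constructor
        · rw [List.length_append, hlen11]; omega
        · rw [List.take_append_of_le_length (by omega), List.take_take]
          norm_num
    rw [PySem.Chars.startswith_iff, List.prefix_iff_eq_take]
    rw [show ("categories:".toList).length = 11 from rfl]
    rw [← pv_lower_take, hkey.2, hpat]

theorem pv_loopA_nil_line : pvLoopA [[]] = [] := by
  simp only [pvLoopA]
  rw [if_neg (by decide)]

theorem pv_main (s : List Char) (hdom : ∀ c ∈ s, pvDomChar c = true) :
    ∀ (fuel i : Nat), s.length - i < fuel →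
    pvLoopB s fuel i = pvLoopA (PySem.Chars.splitOn (s.drop i) ['\n']) := by
  intro fuel
  induction fuel with
  | zero => intro i h; omega
  | succ f ih =>
      intro i hfu
      by_cases hi : i < s.length
      · -- decompose the current suffix into first line and rest
        have hdomu : ∀ c ∈ s.drop i, pvDomChar c = true :=
          fun c hc => hdom c ((List.drop_sublist i s).subset hc)
        set u := s.drop i with hu
        set a := u.takeWhile (fun c => !(c == '\n')) with ha
        set rr := u.dropWhile (fun c => !(c == '\n')) with hrr
        have hua : u = a ++ rr := (List.takeWhile_append_dropWhile).symm
        have hanl : '\n' ∉ a := by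
          intro hm
          have := List.mem_takeWhile_imp hm
          simp at this
        have hdoma : ∀ c ∈ a, pvDomChar c = true :=
          fun c hc => hdomu c (by rw [hua]; exact List.mem_append_left _ hc)
        have hws_a : ∀ x ∈ a, pvWS.contains x = PySem.Chars.isspace x := by
          intro x hx
          have hxnl : x ≠ '\n' := fun hh => hanl (hh ▸ hx)
          exact pv_ws_eq_isspace x (hdoma x hx) hxnl
        set w := a.takeWhile (pvWS.contains ·) with hw
        set core := a.dropWhile PySem.Chars.isspace with hcore
        have hdropa : a.dropWhile (pvWS.contains ·) = core :=
          pv_dropWhile_congr _ _ a hws_a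
        have hawc : a = w ++ core := by
          rw [hw, ← hdropa, List.takeWhile_append_dropWhile]
        have hcorenl : '\n' ∉ core := by
          intro hm
          exact hanl ((List.dropWhile_sublist _).subset hm)
        have hrcase : rr = [] ∨ ∃ r', rr = '\n' :: r' := by
          cases hc : rr with
          | nil => exact Or.inl rfl
          | cons d r' =>
              right
              refine ⟨r', ?_⟩
              have hd := pv_dropWhile_head _ u d r' (by rw [← hrr, hc])
              simp only [Bool.not_eq_false', beq_iff_eq] at hd
              rw [hd]
        -- value of the initial whitespace skip
        have htw_u : u.takeWhile (pvWS.contains ·) = w := by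
          rw [hua, List.takeWhile_append]
          have hwnil : rr.takeWhile (pvWS.contains ·) = [] := by
            rcases hrcase with hre | ⟨r', hre⟩
            · rw [hre]; rfl
            · rw [hre, List.takeWhile_cons, if_neg (by decide)]
          split_ifs with hl
          · rw [hwnil, List.append_nil, hw]
            exact ((List.takeWhile_prefix _).eq_of_length hl).symm
          · rfl
        have hulen : u.length = s.length - i := by rw [hu, List.length_drop]
        have hwle : w.length ≤ u.length := by
          rw [← htw_u]
          exact (List.takeWhile_prefix _).length_le
        have hi1 : pvSkipWS s (s.length - i) i = i + w.length := by
          have hb : ((s.drop i).takeWhile (pvWS.contains ·)).length ≤ s.length - i := by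
            calc ((s.drop i).takeWhile (pvWS.contains ·)).length
                ≤ (s.drop i).length := (List.takeWhile_prefix _).length_le
              _ = s.length - i := List.length_drop
          have := pv_skipWS_eq s (s.length - i) i hb
          rw [← hu, htw_u] at this
          exact this
        have hi1le : i + w.length ≤ s.length := by omega
        have hdrop1 : s.drop (i + w.length) = core ++ rr := by
          have h1 : s.drop (i + w.length) = u.drop w.length := by
            rw [hu, List.drop_drop, Nat.add_comm]
          rw [h1, hua, hawc, List.append_assoc]
          exact List.drop_left
        have hBunf : pvLoopB s (f + 1) i = if i < s.length then
            (if PySem.Chars.lower (PySem.List.slice s (some ((pvSkipWS s (s.length - i) i : Nat) : Int))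
                  (some (((pvSkipWS s (s.length - i) i : Nat) : Int) + 11))) = "categories:".toList then
               (((PySem.Chars.splitOn (PySem.Chars.strip (PySem.List.slice s
                    (some (((pvSkipWS s (s.length - i) i : Nat) : Int) + 11))
                    (some (if PySem.Chars.findFrom s ['\n'] ((pvSkipWS s (s.length - i) i : Nat) : Int) = -1
                           then (s.length : Int)
                           else PySem.Chars.findFrom s ['\n'] ((pvSkipWS s (s.length - i) i : Nat) : Int)))))
                  [',']).map PySem.Chars.strip).filter (fun c => !c.isEmpty)).map String.ofList
             else pvLoopB s f (pvSkipLine s (s.length - pvSkipWS s (s.length - i) i)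
                    (pvSkipWS s (s.length - i) i) + 1))
          else [] := rfl
        rw [hBunf, if_pos hi, hi1]
        have hslice1 : PySem.List.slice s (some ((i + w.length : Nat) : Int))
            (some (((i + w.length : Nat) : Int) + 11)) = (core ++ rr).take 11 := by
          rw [show (((i + w.length : Nat) : Int) + 11) = (((i + w.length + 11 : Nat)) : Int) by
            push_cast; ring]
          rw [PySem.List.slice_natCast]
          rw [show i + w.length + 11 - (i + w.length) = 11 by omega, hdrop1]
        rw [hslice1]
        have hstripa : PySem.Chars.strip a = PySem.Chars.rstrip core := rfl
        have hlenawc : a.length = w.length + core.length := by rw [hawc, List.length_append]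
        rcases hrcase with hre | ⟨r', hre⟩
        · -- last line (no further newline)
          rw [hre, List.append_nil]
          have hsplitu : PySem.Chars.splitOn u ['\n'] = [a] := by
            rw [hua, hre, List.append_nil]
            exact pv_splitOn_no_sep '\n' a hanl
          rw [hsplitu]
          have hieq : i + w.length + core.length = s.length := by
            have hul : u.length = a.length := by rw [hua, hre, List.append_nil]
            omega
          have hfind0 : PySem.Chars.findFrom s ['\n'] ((i + w.length : Nat) : Int) = -1 := by
            rw [PySem.Chars.findFrom_natCast s ['\n'] (i + w.length) hi1le, hdrop1, hre,
              List.append_nil]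
            rw [(PySem.Chars.find_eq_neg_one_iff core ['\n']).mpr
              (by rw [List.singleton_infix_iff]; exact hcorenl)]
            rfl
          by_cases hcnd : PySem.Chars.lower (core.take 11) = "categories:".toList
          · obtain ⟨h11, hpat⟩ := pv_window_len core [] (Or.inl rfl)
              (by rw [List.append_nil]; exact hcnd)
            have hA : PySem.Chars.startswith (PySem.Chars.lower (PySem.Chars.strip a))
                ("categories:".toList) = true := by
              rw [hstripa]
              exact (pv_cond core [] (Or.inl rfl)).mpr (by rw [List.append_nil]; exact hcnd)
            rw [if_pos hcnd]
            have htail : PySem.Chars.strip (PySem.List.slice s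
                (some (((i + w.length : Nat) : Int) + 11))
                (some (if PySem.Chars.findFrom s ['\n'] ((i + w.length : Nat) : Int) = -1
                       then (s.length : Int)
                       else PySem.Chars.findFrom s ['\n'] ((i + w.length : Nat) : Int))))
                = PySem.Chars.strip (core.drop 11) := by
              rw [hfind0, if_pos rfl]
              rw [show (((i + w.length : Nat) : Int) + 11) = (((i + w.length + 11 : Nat)) : Int) by
                push_cast; ring]
              rw [show (s.length : Int) = ((s.length : Nat) : Int) from rfl, PySem.List.slice_natCast]
              rw [List.take_of_length_le (by rw [List.length_drop])]
              rw [← List.drop_drop, hdrop1, hre, List.append_nil]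
            rw [htail]
            simp only [pvLoopA]
            rw [if_pos hA, pv_catsA _ hA, hstripa, pv_tail core h11 hpat]
          · rw [if_neg hcnd]
            have hA : ¬ (PySem.Chars.startswith (PySem.Chars.lower (PySem.Chars.strip a))
                ("categories:".toList) = true) := by
              rw [hstripa]
              intro hx
              exact hcnd (by
                have := (pv_cond core [] (Or.inl rfl)).mp hx
                rwa [List.append_nil] at this)
            have hskip2 : pvSkipLine s (s.length - (i + w.length)) (i + w.length)
                = i + w.length + core.length := by
              have hb : ((s.drop (i + w.length)).takeWhile (fun c => !(c == '\n'))).length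
                  ≤ s.length - (i + w.length) := by
                calc ((s.drop (i + w.length)).takeWhile (fun c => !(c == '\n'))).length
                    ≤ (s.drop (i + w.length)).length := (List.takeWhile_prefix _).length_le
                  _ = s.length - (i + w.length) := List.length_drop
              have heq := pv_skipLine_eq s (s.length - (i + w.length)) (i + w.length) hb
              have htwc : (s.drop (i + w.length)).takeWhile (fun c => !(c == '\n')) = core := by
                rw [hdrop1, hre, List.append_nil]
                exact List.takeWhile_eq_self_iff.mpr (by
                  intro x hx
                  simp only [Bool.not_eq_eq_eq_not, Bool.not_true, beq_eq_false_iff_ne, ne_eq]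
                  exact fun hh => hcorenl (hh ▸ hx))
              rw [htwc] at heq
              exact heq
            rw [hskip2]
            rw [ih (i + w.length + core.length + 1) (by omega)]
            rw [List.drop_eq_nil_of_le (by omega)]
            rw [show PySem.Chars.splitOn ([] : List Char) ['\n'] = [[]] from rfl, pv_loopA_nil_line]
            simp only [pvLoopA]
            rw [if_neg hA]
        · -- a newline follows this line
          have hrne : rr ≠ [] := by rw [hre]; exact List.cons_ne_nil _ _
          have hsplitu : PySem.Chars.splitOn u ['\n'] = a :: PySem.Chars.splitOn r' ['\n'] := by
            rw [hua, hre]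
            exact pv_splitOn_cons '\n' a r' hanl
          rw [hsplitu, hre]
          have hfindv : PySem.Chars.findFrom s ['\n'] ((i + w.length : Nat) : Int)
              = ((i + w.length + core.length : Nat) : Int) := by
            rw [PySem.Chars.findFrom_natCast s ['\n'] (i + w.length) hi1le, hdrop1, hre,
              pv_find_nl core r' hcorenl]
            rw [if_neg (by omega)]
            push_cast
            ring
          by_cases hcnd : PySem.Chars.lower ((core ++ '\n' :: r').take 11) = "categories:".toList
          · obtain ⟨h11, hpat⟩ := pv_window_len core ('\n' :: r') (Or.inr ⟨r', rfl⟩) hcnd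
            have hA : PySem.Chars.startswith (PySem.Chars.lower (PySem.Chars.strip a))
                ("categories:".toList) = true := by
              rw [hstripa]
              exact (pv_cond core ('\n' :: r') (Or.inr ⟨r', rfl⟩)).mpr hcnd
            rw [if_pos hcnd]
            have htail : PySem.Chars.strip (PySem.List.slice s
                (some (((i + w.length : Nat) : Int) + 11))
                (some (if PySem.Chars.findFrom s ['\n'] ((i + w.length : Nat) : Int) = -1
                       then (s.length : Int)
                       else PySem.Chars.findFrom s ['\n'] ((i + w.length : Nat) : Int))))
                = PySem.Chars.strip (core.drop 11) := by
              rw [hfindv]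
              rw [if_neg (by
                intro hx
                have : (0 : Int) ≤ ((i + w.length + core.length : Nat) : Int) := Int.natCast_nonneg _
                omega)]
              rw [show (((i + w.length : Nat) : Int) + 11) = (((i + w.length + 11 : Nat)) : Int) by
                push_cast; ring]
              rw [PySem.List.slice_natCast]
              rw [show i + w.length + core.length - (i + w.length + 11) = core.length - 11 by omega]
              rw [← List.drop_drop, hdrop1, hre]
              rw [List.drop_append, show (11 : Nat) - core.length = 0 by omega, List.drop_zero]
              rw [List.take_append_of_le_length (by rw [List.length_drop])]
              rw [List.take_of_length_le (by rw [List.length_drop])]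
            rw [htail]
            simp only [pvLoopA]
            rw [if_pos hA, pv_catsA _ hA, hstripa, pv_tail core h11 hpat]
          · rw [if_neg hcnd]
            have hA : ¬ (PySem.Chars.startswith (PySem.Chars.lower (PySem.Chars.strip a))
                ("categories:".toList) = true) := by
              rw [hstripa]
              intro hx
              exact hcnd ((pv_cond core ('\n' :: r') (Or.inr ⟨r', rfl⟩)).mp hx)
            have hskip2 : pvSkipLine s (s.length - (i + w.length)) (i + w.length)
                = i + w.length + core.length := by
              have hb : ((s.drop (i + w.length)).takeWhile (fun c => !(c == '\n'))).length
                  ≤ s.length - (i + w.length) := by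
                calc ((s.drop (i + w.length)).takeWhile (fun c => !(c == '\n'))).length
                    ≤ (s.drop (i + w.length)).length := (List.takeWhile_prefix _).length_le
                  _ = s.length - (i + w.length) := List.length_drop
              have heq := pv_skipLine_eq s (s.length - (i + w.length)) (i + w.length) hb
              have htwc : (s.drop (i + w.length)).takeWhile (fun c => !(c == '\n')) = core := by
                rw [hdrop1, hre, List.takeWhile_append]
                have hcoreall : core.takeWhile (fun c => !(c == '\n')) = core :=
                  List.takeWhile_eq_self_iff.mpr (by
                    intro x hx
                    simp only [Bool.not_eq_eq_eq_not, Bool.not_true, beq_eq_false_iff_ne, ne_eq]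
                    exact fun hh => hcorenl (hh ▸ hx))
                rw [hcoreall, if_pos rfl, List.takeWhile_cons, if_neg (by decide), List.append_nil]
              rw [htwc] at heq
              exact heq
            rw [hskip2]
            have hdropnext : s.drop (i + w.length + core.length + 1) = r' := by
              have h1 : s.drop (i + w.length + core.length + 1)
                  = (s.drop (i + w.length)).drop (core.length + 1) := by
                rw [List.drop_drop, ← Nat.add_assoc]
              rw [h1, hdrop1, hre, List.drop_append]
              rw [List.drop_eq_nil_of_le (by omega), show core.length + 1 - core.length = 1 by omega]
              rfl
            rw [ih (i + w.length + core.length + 1) (by omega), hdropnext]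
            simp only [pvLoopA]
            rw [if_neg hA]
      · have hdrop : s.drop i = [] := List.drop_eq_nil_of_le (by omega)
        rw [hdrop]
        have hsplit : PySem.Chars.splitOn [] ['\n'] = [[]] := rfl
        rw [hsplit, pv_loopA_nil_line]
        have hunf2 : pvLoopB s (f + 1) i = if i < s.length then
            (if PySem.Chars.lower (PySem.List.slice s (some ((pvSkipWS s (s.length - i) i : Nat) : Int))
                  (some (((pvSkipWS s (s.length - i) i : Nat) : Int) + 11))) = "categories:".toList then
               (((PySem.Chars.splitOn (PySem.Chars.strip (PySem.List.slice s
                    (some (((pvSkipWS s (s.length - i) i : Nat) : Int) + 11))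
                    (some (if PySem.Chars.findFrom s ['\n'] ((pvSkipWS s (s.length - i) i : Nat) : Int) = -1
                           then (s.length : Int)
                           else PySem.Chars.findFrom s ['\n'] ((pvSkipWS s (s.length - i) i : Nat) : Int)))))
                  [',']).map PySem.Chars.strip).filter (fun c => !c.isEmpty)).map String.ofList
             else pvLoopB s f (pvSkipLine s (s.length - pvSkipWS s (s.length - i) i)
                    (pvSkipWS s (s.length - i) i) + 1))
          else [] := rfl
        rw [hunf2, if_neg hi]

-- ===== VERDICT =====
theorem extract_categories_from_description_spec :
    Claim_equal_extract_categories_from_description := by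
  intro description hdom
  unfold Spec_extract_categories_from_description
  unfold extract_categories_from_description extract_categories_from_description_alt
  have hdom' : ∀ c ∈ description.toList, pvDomChar c = true := by
    intro c hc
    exact List.all_eq_true.mp hdom c hc
  rw [pv_main description.toList hdom' (description.toList.length + 1) 0 (by omega)]
  by_cases h : description = ""
  · subst h
    rw [if_pos rfl]
    rw [show (("" : String).toList.drop 0) = [] from rfl]
    rw [show PySem.Chars.splitOn [] ['\n'] = [[]] from rfl, pv_loopA_nil_line]
  · rw [if_neg h, List.drop_zero]
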